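-- pv_equiv track=rewrite | github.com/DenizSungurtekin/Cryptography | Galois Counter Mode/main.py | matrixToblocks
-- ===== SOURCE A (Python) =====
-- def matrixToblocks(matrix): # with it we can directly use the AES.MessageToMatrix function to have our blocks of 128 bits
--     flat_matrix = [item for sublist in matrix for item in sublist]
--     size = len(flat_matrix)
--     res = []
--     for i in range(int(size/16)):
--         res.append(flat_matrix[i*16:(i+1)*16])
--
--     diff = size % 16
--     liste = flat_matrix[int(size/16)*16:]
--
--     if diff != 0:
--         res.append(liste)
--     return res
-- ===== SOURCE B (Python) =====
-- def matrixToblocks(matrix):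
--     # single fused pass: accumulate elements into a buffer, emit each full 16-block
--     res = []
--     current = []
--     for sublist in matrix:
--         for item in sublist:
--             current.append(item)
--             if len(current) == 16:
--                 res.append(current)
--                 current = []
--     if current:
--         res.append(current)
--     return res
-- ===== Notes on version B (the rewrite author's own statement) =====
-- stated objective: simpler
-- what changed: B fuses flattening and chunking into one element-by-element pass with a running buffer emitted at length 16, replacing A's intermediate flat list plus index-based fixed-width slicing and a remainder branch.
import Mathlib
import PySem

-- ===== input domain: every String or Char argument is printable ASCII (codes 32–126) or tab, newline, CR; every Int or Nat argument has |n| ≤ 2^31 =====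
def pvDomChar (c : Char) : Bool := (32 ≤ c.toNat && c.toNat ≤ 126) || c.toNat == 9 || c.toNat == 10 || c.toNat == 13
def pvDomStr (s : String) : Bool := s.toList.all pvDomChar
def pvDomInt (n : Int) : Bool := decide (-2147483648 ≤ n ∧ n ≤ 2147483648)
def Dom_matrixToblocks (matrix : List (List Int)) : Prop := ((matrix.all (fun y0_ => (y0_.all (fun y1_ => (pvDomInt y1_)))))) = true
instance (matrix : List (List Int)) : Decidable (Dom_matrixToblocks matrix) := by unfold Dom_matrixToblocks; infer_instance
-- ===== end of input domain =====

-- B fuses flattening and chunking into one element-by-element pass with a running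
-- buffer emitted whenever it reaches length 16 (objective: simpler, one pass, no slicing).

-- ===== PORT A =====
-- the body of A after the flattening comprehension, on the flat list
-- (int(size/16) = size // 16 exactly, since size = len(...) ≥ 0)
def matrixToblocksCore (flat : List Int) : List (List Int) :=
  let size : Int := flat.length
  let res : List (List Int) :=
    (PySem.List.pyRange 0 (PySem.Int.floordiv size 16) 1).foldl
      (fun r i => r ++ [PySem.List.slice flat (some (i * 16)) (some ((i + 1) * 16))]) []
  let diff : Int := PySem.Int.mod size 16
  let liste : List Int := PySem.List.slice flat (some (PySem.Int.floordiv size 16 * 16)) none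
  if diff ≠ 0 then res ++ [liste] else res

def matrixToblocks (matrix : List (List Int)) : List (List Int) :=
  -- flat_matrix = [item for sublist in matrix for item in sublist]
  let flat_matrix : List Int :=
    matrix.foldl (fun acc sublist => sublist.foldl (fun a item => a ++ [item]) acc) []
  matrixToblocksCore flat_matrix

-- ===== PORT B =====
-- one step of B's inner loop: push item onto current, emit when it reaches 16
def bstep (st : List (List Int) × List Int) (item : Int) : List (List Int) × List Int :=
  if (st.2 ++ [item]).length = 16 then (st.1 ++ [st.2 ++ [item]], []) else (st.1, st.2 ++ [item])

def matrixToblocks_alt (matrix : List (List Int)) : List (List Int) :=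
  let st := matrix.foldl (fun st sublist => sublist.foldl bstep st) ([], [])
  if st.2 = [] then st.1 else st.1 ++ [st.2]

-- ===== PRECONDITION & SPEC =====
def Spec_matrixToblocks (matrix : List (List Int)) (out : List (List Int)) : Prop := out = matrixToblocks_alt matrix
instance (matrix : List (List Int)) (out : List (List Int)) : Decidable (Spec_matrixToblocks matrix out) := by unfold Spec_matrixToblocks; infer_instance

-- ===== CLAIM (what is proved, stated in full; the proofs are below) =====
def Claim_equal_matrixToblocks : Prop := ∀ (matrix : List (List Int)), Dom_matrixToblocks matrix → Spec_matrixToblocks matrix (matrixToblocks matrix)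

-- ===== LEMMAS AND PROOFS =====

-- reference chunking: successive 16-blocks, short final block kept
def chunk16 (l : List Int) : List (List Int) :=
  if l = [] then [] else l.take 16 :: chunk16 (l.drop 16)
termination_by l.length
decreasing_by
  rename_i h
  have : 0 < l.length := List.length_pos_iff.mpr h
  simp [List.length_drop]; omega

lemma chunk16_nil : chunk16 [] = [] := by simp [chunk16]

lemma chunk16_short {l : List Int} (h : l.length < 16) (hne : l ≠ []) :
    chunk16 l = [l] := by
  rw [chunk16, if_neg hne, List.take_of_length_le (Nat.le_of_lt h),
    List.drop_eq_nil_of_le (Nat.le_of_lt h), chunk16_nil]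

lemma chunk16_cons16 {a b : List Int} (h : a.length = 16) :
    chunk16 (a ++ b) = a :: chunk16 b := by
  rw [chunk16]
  have hne : a ++ b ≠ [] := by
    intro hc
    have := congrArg List.length hc
    simp [h] at this
  rw [if_neg hne, List.take_append_of_le_length (by omega), List.drop_append_of_le_length (by omega),
    List.take_of_length_le h.le, List.drop_eq_nil_of_le h.le, List.nil_append]

-- the Nat-arithmetic form of A's core
lemma core_nat_form (flat : List Int) :
    ∀ n, flat.length = n →
    (List.range (n / 16)).map (fun k => (flat.drop (16 * k)).take 16)
      ++ (if n % 16 ≠ 0 then [flat.drop (16 * (n / 16))] else [])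
      = chunk16 flat := by
  intro n
  induction n using Nat.strong_induction_on generalizing flat with
  | _ n ih =>
    intro hn
    by_cases hsmall : n < 16
    · have hq : n / 16 = 0 := Nat.div_eq_of_lt hsmall
      have hm : n % 16 = n := Nat.mod_eq_of_lt hsmall
      rcases eq_or_ne flat [] with rfl | hne
      · simp at hn; simp [← hn, chunk16_nil]
      · have hn0 : n ≠ 0 := by
          intro h0; exact hne (List.eq_nil_of_length_eq_zero (by omega))
        simp [hq, hm, hn0, chunk16_short (by omega) hne]
    · rw [Nat.not_lt] at hsmall
      set flat' := flat.drop 16 with hflat'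
      have hlen' : flat'.length = n - 16 := by simp [hflat', hn]
      have hsplit : flat = flat.take 16 ++ flat' := (List.take_append_drop 16 flat).symm
      have htk : (flat.take 16).length = 16 := by simp [hn]; omega
      have hq : n / 16 = (n - 16) / 16 + 1 := by omega
      have hm : n % 16 = (n - 16) % 16 := by omega
      have hdrops : ∀ k, flat.drop (16 * (k + 1)) = flat'.drop (16 * k) := by
        intro k
        simp [hflat', List.drop_drop]
        ring_nf
      have ihr := ih (n - 16) (by omega) flat' hlen'
      calc (List.range (n / 16)).map (fun k => (flat.drop (16 * k)).take 16)
            ++ (if n % 16 ≠ 0 then [flat.drop (16 * (n / 16))] else [])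
          = flat.take 16 ::
            ((List.range ((n - 16) / 16)).map (fun k => (flat'.drop (16 * k)).take 16)
              ++ (if (n - 16) % 16 ≠ 0 then [flat'.drop (16 * ((n - 16) / 16))] else [])) := by
            rw [hq, List.range_succ_eq_map]
            simp only [List.map_cons, List.map_map, hm]
            rw [hdrops ((n-16)/16)]
            simp only [Nat.mul_zero, List.drop_zero, List.cons_append]
            congr 2
            apply List.map_congr_left
            intro k _
            simp [Function.comp, hdrops k]
        _ = flat.take 16 :: chunk16 flat' := by rw [ihr]
        _ = chunk16 flat := by
            conv_rhs => rw [hsplit]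
            rw [chunk16_cons16 htk]

-- A's core equals the reference chunking
lemma core_eq_chunk16 (flat : List Int) : matrixToblocksCore flat = chunk16 flat := by
  unfold matrixToblocksCore
  have hfd : PySem.Int.floordiv (flat.length : Int) 16 = ((flat.length / 16 : Nat) : Int) := by
    exact_mod_cast PySem.Int.floordiv_natCast flat.length 16
  have hmd : PySem.Int.mod (flat.length : Int) 16 = ((flat.length % 16 : Nat) : Int) := by
    exact_mod_cast PySem.Int.mod_natCast flat.length 16
  simp only [hfd, hmd]
  rw [PySem.List.pyRange_one, PySem.List.foldl_append_singleton_eq_map]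
  have htn : ((((flat.length / 16 : Nat) : Int)) - 0).toNat = flat.length / 16 := by omega
  rw [htn]
  have hmaps : (List.range (flat.length / 16)).map
        ((fun i => PySem.List.slice flat (some (i * 16)) (some ((i + 1) * 16))) ∘
          (fun k : Nat => (0 : Int) + k))
      = (List.range (flat.length / 16)).map (fun k => (flat.drop (16 * k)).take 16) := by
    apply List.map_congr_left
    intro k _
    have h1 : ((0 : Int) + (k : Int)) * 16 = ((16 * k : Nat) : Int) := by push_cast; ring
    have h2 : ((0 : Int) + (k : Int) + 1) * 16 = ((16 * k : Nat) : Int) + ((16 : Nat) : Int) := by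
      push_cast; ring
    simp only [Function.comp]
    rw [h1, h2, PySem.List.slice_natCast_add]
  rw [List.map_map, hmaps]
  have hfrom : PySem.List.slice flat (some (((flat.length / 16 : Nat) : Int) * 16)) none
      = flat.drop (16 * (flat.length / 16)) := by
    have h1 : (((flat.length / 16 : Nat) : Int) * 16) = ((16 * (flat.length / 16) : Nat) : Int) := by
      push_cast; ring
    rw [h1, PySem.List.slice_from_natCast]
  rw [hfrom, ← core_nat_form flat flat.length rfl]
  by_cases hz : flat.length % 16 = 0
  · rw [if_neg (by exact_mod_cast not_not.mpr hz), if_neg (by omega)]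
    simp
  · rw [if_pos (by exact_mod_cast hz), if_pos hz]
    simp

-- B's fold, finished, equals the reference chunking (loop invariant)
lemma bfold_invariant (l : List Int) :
    ∀ (res : List (List Int)) (cur : List Int), cur.length < 16 →
    (let st := l.foldl bstep (res, cur);
     if st.2 = [] then st.1 else st.1 ++ [st.2]) = res ++ chunk16 (cur ++ l) := by
  induction l with
  | nil =>
    intro res cur hcur
    rcases eq_or_ne cur [] with rfl | hne
    · simp [chunk16_nil]
    · simp [hne, chunk16_short hcur hne]
  | cons x xs ih =>
    intro res cur hcur
    simp only [List.foldl_cons]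
    by_cases hfull : (cur ++ [x]).length = 16
    · have hb : bstep (res, cur) x = (res ++ [cur ++ [x]], []) := by
        simp [bstep, hfull]
      rw [hb, ih (res ++ [cur ++ [x]]) [] (by simp)]
      have : cur ++ x :: xs = (cur ++ [x]) ++ xs := by simp
      rw [this, chunk16_cons16 hfull]
      simp
    · have hb : bstep (res, cur) x = (res, cur ++ [x]) := by
        simp only [bstep]
        rw [if_neg hfull]
      have hlen : (cur ++ [x]).length < 16 := by
        simp only [List.length_append, List.length_cons, List.length_nil] at hfull ⊢
        omega
      rw [hb, ih res (cur ++ [x]) hlen]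
      congr 1
      simp

-- both flattenings are List.flatten
lemma aflat_eq (matrix : List (List Int)) :
    matrix.foldl (fun acc sublist => sublist.foldl (fun a item => a ++ [item]) acc) []
      = matrix.flatten := by
  have h : ∀ (m : List (List Int)) (acc : List Int),
      m.foldl (fun acc sublist => sublist.foldl (fun a item => a ++ [item]) acc) acc
        = acc ++ m.flatten := by
    intro m
    induction m with
    | nil => intro acc; simp
    | cons s t ih =>
      intro acc
      simp only [List.foldl_cons, ih, List.flatten_cons]
      rw [PySem.List.foldl_append_singleton]
      simp
  simpa using h matrix []

lemma bfold_eq_flatten (matrix : List (List Int)) :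
    matrix.foldl (fun st sublist => sublist.foldl bstep st) (([], []) : List (List Int) × List Int)
      = matrix.flatten.foldl bstep ([], []) := by
  rw [← List.foldl_flatten]

-- ===== VERDICT (by name: the statement is the Claim_ definition above) =====
theorem matrixToblocks_spec : Claim_equal_matrixToblocks := by
  intro matrix _
  unfold Spec_matrixToblocks matrixToblocks matrixToblocks_alt
  rw [aflat_eq, bfold_eq_flatten, core_eq_chunk16]
  have := bfold_invariant matrix.flatten [] [] (by simp)
  simpa using this.symm
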